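-- pv_equiv track=rewrite | github.com/shivanipuli/ArtificialIntelligence | nQueens/nQueens3.py | get_sorted_values
-- ===== SOURCE A (Python) =====
-- from heapq import heappop, heappush, heapify
--
-- def collisions(board,ind):
--     count=board.count(board[ind])-1 # number of column conflicts
--     myDiff=ind-board[ind]
--     differences=[x-board[x] for x in range(len(board))]
--     count += differences.count(myDiff)-1 # number of diag1 coflicts
--     mySum=ind+board[ind]
--     sums=[x+board[x] for x in range(len(board)) if board[x]!=-1]
--     count+=sums.count(mySum)-1
--     return count
--
-- def get_sorted_values(state,row):
--     col=state[row]
--     lis=[]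
--     for num in range(len(state)):
--         if num!=col:
--             new_state = state[:row] + [num] + state[row + 1:]
--             val=collisions(new_state,row)
--             lis.append((val,num))
--     heapify(lis)
--     return lis
-- ===== SOURCE B (Python) =====
-- from heapq import heapify
--
-- def _counter(items):
--     c = {}
--     for k in items:
--         c[k] = c.get(k, 0) + 1
--     return c
--
-- def get_sorted_values(state, row):
--     n = len(state)
--     col = state[row]
--     others = [(x, state[x]) for x in range(n) if x != row]
--     col_cnt = _counter([v for _, v in others])
--     diag_cnt = _counter([x - v for x, v in others])
--     anti_cnt = _counter([x + v for x, v in others if v != -1])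
--     lis = [(col_cnt.get(num, 0) + diag_cnt.get(row - num, 0) + anti_cnt.get(row + num, 0), num)
--            for num in range(n) if num != col]
--     heapify(lis)
--     return lis
-- ===== Notes on version B (the rewrite author's own statement) =====
-- stated objective: faster
-- what changed: Instead of rebuilding the whole board and recounting three O(n) lists for every candidate column (O(n^2)), B builds column/diagonal/anti-diagonal frequency counters over the other rows once and answers each candidate with three O(1) dictionary lookups before the same heapify.
-- outside the precondition, e.g. on get_sorted_values([0, 1], -1): A returns [(-1, 0)], B returns [(1, 0)]; on get_sorted_values([0, 1], -2): A returns [(-1, 1)], B returns [(1, 1)]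
import Mathlib
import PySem

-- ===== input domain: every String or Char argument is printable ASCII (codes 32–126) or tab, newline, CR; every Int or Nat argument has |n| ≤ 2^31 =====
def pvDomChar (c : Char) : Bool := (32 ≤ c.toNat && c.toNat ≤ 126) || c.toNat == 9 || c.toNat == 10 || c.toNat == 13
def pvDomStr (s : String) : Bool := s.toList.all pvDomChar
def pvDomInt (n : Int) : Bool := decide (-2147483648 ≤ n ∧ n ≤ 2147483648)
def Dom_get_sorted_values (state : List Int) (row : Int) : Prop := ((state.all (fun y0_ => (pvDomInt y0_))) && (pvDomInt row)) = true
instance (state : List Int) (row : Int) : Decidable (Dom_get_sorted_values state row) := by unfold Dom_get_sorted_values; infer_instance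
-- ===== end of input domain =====

-- B replaces A's per-candidate board rebuild + three list recounts (O(n^2)) by frequency
-- counters built once over the other rows, answering each candidate by dict lookups (O(n));
-- both then apply the same CPython heapify.

-- ===== PORT A =====
-- CPython's heapq.heapify (the Python calls it), hand-ported step for step;
-- fuel only guards totality (it is never exhausted on the sizes the lists here have)
def pyLexLtA (a b : Int × Int) : Bool := a.1 < b.1 || (a.1 == b.1 && a.2 < b.2)

def pySiftdownA (heap : Array (Int × Int)) (startpos pos : Nat) (newitem : Int × Int) : Nat → Array (Int × Int)
  | 0 => heap.setIfInBounds pos newitem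
  | fuel + 1 =>
    if startpos < pos then
      let parentpos := (pos - 1) / 2
      let parent := heap.getD parentpos newitem
      if pyLexLtA newitem parent then
        pySiftdownA (heap.setIfInBounds pos parent) startpos parentpos newitem fuel
      else heap.setIfInBounds pos newitem
    else heap.setIfInBounds pos newitem

def pySiftupA (heap : Array (Int × Int)) (startpos pos : Nat) (newitem : Int × Int) : Nat → Array (Int × Int)
  | 0 => heap
  | fuel + 1 =>
    let endpos := heap.size
    let childpos := 2 * pos + 1
    if childpos < endpos then
      let childpos := if childpos + 1 < endpos &&
          !(pyLexLtA (heap.getD childpos newitem) (heap.getD (childpos + 1) newitem))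
        then childpos + 1 else childpos
      pySiftupA (heap.setIfInBounds pos (heap.getD childpos newitem)) startpos childpos newitem fuel
    else
      pySiftdownA (heap.setIfInBounds pos newitem) startpos pos newitem fuel

def pyHeapifyA (l : List (Int × Int)) : List (Int × Int) :=
  let arr := (List.range (l.length / 2)).reverse.foldl
    (fun h i => pySiftupA h i i (h.getD i (0, 0)) (h.size + 1)) l.toArray
  arr.toList

def collisionsA (board : List Int) (ind : Int) : Int :=
  let bi := PySem.List.pyGetD board ind 0
  let count : Int := (board.count bi : Int) - 1
  let myDiff := ind - bi
  let differences := (PySem.List.pyRange 0 (board.length : Int) 1).map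
    (fun x => x - PySem.List.pyGetD board x 0)
  let count := count + ((differences.count myDiff : Int) - 1)
  let mySum := ind + bi
  let sums := ((PySem.List.pyRange 0 (board.length : Int) 1).filter
      (fun x => PySem.List.pyGetD board x 0 != -1)).map
    (fun x => x + PySem.List.pyGetD board x 0)
  let count := count + ((sums.count mySum : Int) - 1)
  count

def get_sorted_values (state : List Int) (row : Int) : List (Int × Int) :=
  let col := PySem.List.pyGetD state row 0
  let lis := (PySem.List.pyRange 0 (state.length : Int) 1).foldl
    (fun lis num =>
      if num != col then
        let new_state := PySem.List.slice state none (some row) ++ [num] ++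
          PySem.List.slice state (some (row + 1)) none
        let val := collisionsA new_state row
        lis ++ [(val, num)]
      else lis) []
  pyHeapifyA lis

-- ===== PORT B =====
-- CPython's heapq.heapify (the Python calls it), hand-ported step for step;
-- fuel only guards totality (it is never exhausted on the sizes the lists here have)
def pyLexLtB (a b : Int × Int) : Bool := a.1 < b.1 || (a.1 == b.1 && a.2 < b.2)

def pySiftdownB (heap : Array (Int × Int)) (startpos pos : Nat) (newitem : Int × Int) : Nat → Array (Int × Int)
  | 0 => heap.setIfInBounds pos newitem
  | fuel + 1 =>
    if startpos < pos then
      let parentpos := (pos - 1) / 2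
      let parent := heap.getD parentpos newitem
      if pyLexLtB newitem parent then
        pySiftdownB (heap.setIfInBounds pos parent) startpos parentpos newitem fuel
      else heap.setIfInBounds pos newitem
    else heap.setIfInBounds pos newitem

def pySiftupB (heap : Array (Int × Int)) (startpos pos : Nat) (newitem : Int × Int) : Nat → Array (Int × Int)
  | 0 => heap
  | fuel + 1 =>
    let endpos := heap.size
    let childpos := 2 * pos + 1
    if childpos < endpos then
      let childpos := if childpos + 1 < endpos &&
          !(pyLexLtB (heap.getD childpos newitem) (heap.getD (childpos + 1) newitem))
        then childpos + 1 else childpos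
      pySiftupB (heap.setIfInBounds pos (heap.getD childpos newitem)) startpos childpos newitem fuel
    else
      pySiftdownB (heap.setIfInBounds pos newitem) startpos pos newitem fuel

def pyHeapifyB (l : List (Int × Int)) : List (Int × Int) :=
  let arr := (List.range (l.length / 2)).reverse.foldl
    (fun h i => pySiftupB h i i (h.getD i (0, 0)) (h.size + 1)) l.toArray
  arr.toList

def counterB (items : List Int) : PySem.Dict Int Int :=
  items.foldl (fun c k => c.insert k (c.getD k 0 + 1)) PySem.Dict.empty

def get_sorted_values_alt (state : List Int) (row : Int) : List (Int × Int) :=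
  let n := (state.length : Int)
  let col := PySem.List.pyGetD state row 0
  let others := ((PySem.List.pyRange 0 n 1).filter (fun x => x != row)).map
    (fun x => (x, PySem.List.pyGetD state x 0))
  let colCnt := counterB (others.map (fun p => p.2))
  let diagCnt := counterB (others.map (fun p => p.1 - p.2))
  let antiCnt := counterB ((others.filter (fun p => p.2 != -1)).map (fun p => p.1 + p.2))
  let lis := ((PySem.List.pyRange 0 n 1).filter (fun num => num != col)).map
    (fun num => (colCnt.getD num 0 + diagCnt.getD (row - num) 0 + antiCnt.getD (row + num) 0, num))
  pyHeapifyB lis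

-- ===== PRECONDITION & SPEC =====
-- Pre_ restricts row to the function's natural domain of nonnegative board indices: for
-- row ≤ -len-1 or row ≥ len Python A raises IndexError, and for -len ≤ row < 0 (Python's
-- negative-index wraparound, which no caller of this n-queens helper uses) A's slice-based
-- board reconstruction and its negative-index diagonal arithmetic return accidental values.
def Pre_get_sorted_values (state : List Int) (row : Int) : Prop :=
  0 ≤ row ∧ row < (state.length : Int)
instance (state : List Int) (row : Int) : Decidable (Pre_get_sorted_values state row) := by
  unfold Pre_get_sorted_values; infer_instance

def pvWitness_get_sorted_values : List Int × Int := ([2, 0, 1, 3], 1)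

def Spec_get_sorted_values (state : List Int) (row : Int) (out : List (Int × Int)) : Prop :=
  out = get_sorted_values_alt state row
instance (state : List Int) (row : Int) (out : List (Int × Int)) :
    Decidable (Spec_get_sorted_values state row out) := by
  unfold Spec_get_sorted_values; infer_instance

-- ===== CLAIM (what is proved, stated in full; the proofs are below) =====
def Claim_equal_get_sorted_values : Prop :=
  ∀ (state : List Int) (row : Int), Dom_get_sorted_values state row →
    Pre_get_sorted_values state row →
    Spec_get_sorted_values state row (get_sorted_values state row)

-- ===== LEMMAS AND PROOFS =====

-- a list is the map of getD over its index range
lemma map_getD_range (l : List Int) :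
    (List.range l.length).map (fun k => l.getD k 0) = l := by
  apply List.ext_getElem
  · simp
  · intro i h1 h2
    simp [List.getD_eq_getElem?_getD, List.getElem?_eq_getElem h2]

-- counting a value in a list = counting matching indices
lemma count_eq_countP_range (l : List Int) (v : Int) :
    l.count v = (List.range l.length).countP (fun k => l.getD k 0 == v) := by
  conv_lhs => rw [← map_getD_range l]
  rw [List.count_eq_countP, List.countP_map]
  rfl

-- split a countP over range n at one index r < n
lemma countP_range_split (n r : Nat) (p : Nat → Bool) (hr : r < n) :
    (List.range n).countP p =
      (List.range n).countP (fun k => !(k == r) && p k) + (if p r then 1 else 0) := by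
  induction n with
  | zero => omega
  | succ n ih =>
    rw [List.range_succ, List.countP_append, List.countP_append]
    by_cases h : r = n
    · subst h
      have : (List.range r).countP p = (List.range r).countP (fun k => !(k == r) && p k) := by
        apply List.countP_congr
        intro k hk
        have : k < r := List.mem_range.mp hk
        simp [Nat.ne_of_lt this]
      simp only [List.countP_cons, List.countP_nil, this]
      cases hp : p r <;> simp
    · have hr' : r < n := by omega
      have := ih hr'
      simp only [List.countP_cons, List.countP_nil] at *
      have hne : ¬(n == r) = true := by simp; omega
      cases hp : p n <;> simp [hp, hne] at * <;> omega

-- canonical counts: matching other rows (k ≠ r) of s, by column / diagonal / anti-diagonal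
def cntCol (s : List Int) (r : Nat) (num : Int) : Nat :=
  (List.range s.length).countP (fun k => !(k == r) && (s.getD k 0 == num))
def cntDiag (s : List Int) (r : Nat) (num : Int) : Nat :=
  (List.range s.length).countP (fun k => !(k == r) && ((k : Int) - s.getD k 0 == (r : Int) - num))
def cntAnti (s : List Int) (r : Nat) (num : Int) : Nat :=
  (List.range s.length).countP
    (fun k => !(k == r) && (s.getD k 0 != -1 && ((k : Int) + s.getD k 0 == (r : Int) + num)))

-- an index other than t.length reads the same in t ++ num :: d and t ++ m :: d
lemma getD_modify_board (t d : List Int) (num m : Int) (k : Nat) (hk : k ≠ t.length) :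
    (t ++ num :: d).getD k 0 = (t ++ m :: d).getD k 0 := by
  rcases Nat.lt_or_ge k t.length with h | h
  · simp [List.getD_eq_getElem?_getD, List.getElem?_append_left h]
  · obtain ⟨j, hj⟩ : ∃ j, k - t.length = j + 1 := ⟨k - t.length - 1, by omega⟩
    rw [List.getD_eq_getElem?_getD, List.getD_eq_getElem?_getD,
      List.getElem?_append_right h, List.getElem?_append_right h, hj,
      List.getElem?_cons_succ, List.getElem?_cons_succ]

lemma getD_board_self (t d : List Int) (num : Int) :
    (t ++ num :: d).getD t.length 0 = num := by
  simp only [List.getD_eq_getElem?_getD, List.getElem?_append_right (Nat.le_refl t.length),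
    Nat.sub_self, List.getElem?_cons_zero, Option.getD_some]

-- A's collisions on the board with row r replaced by num, in canonical-count form
lemma collisionsA_eq (s : List Int) (r : Nat) (num : Int) (hr : r < s.length)
    (hnum : 0 ≤ num) :
    collisionsA (s.take r ++ num :: s.drop (r + 1)) (r : Int) =
      (cntCol s r num : Int) + (cntDiag s r num : Int) + (cntAnti s r num : Int) := by
  have ht : (s.take r).length = r := by simp [Nat.min_eq_left (le_of_lt hr)]
  set t := s.take r with htdef
  set d := s.drop (r + 1) with hddef
  have hs : t ++ s[r]'hr :: d = s := by
    rw [hddef, ← List.drop_eq_getElem_cons hr, htdef, List.take_append_drop]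
  have hblen : (t ++ num :: d).length = s.length := by
    have : d.length = s.length - (r + 1) := by simp [hddef]
    simp [ht, this]; omega
  have hself : (t ++ num :: d).getD r 0 = num := by
    rw [← ht]; exact getD_board_self t d num
  have hother : ∀ k : Nat, k ≠ r → (t ++ num :: d).getD k 0 = s.getD k 0 := by
    intro k hk
    rw [getD_modify_board t d num (s[r]'hr) k (by omega)]
    rw [hs]
  have hbi : PySem.List.pyGetD (t ++ num :: d) (r : Int) 0 = num := by
    rw [PySem.List.pyGetD_natCast]; exact hself
  have hself' : (t ++ num :: d)[r]?.getD 0 = num := by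
    rw [← List.getD_eq_getElem?_getD]; exact hself
  have hother' : ∀ k : Nat, k ≠ r → (t ++ num :: d)[k]?.getD 0 = s[k]?.getD 0 := by
    intro k hk
    rw [← List.getD_eq_getElem?_getD, ← List.getD_eq_getElem?_getD]; exact hother k hk
  have h1 : (t ++ num :: d).count num = cntCol s r num + 1 := by
    rw [count_eq_countP_range, hblen, countP_range_split _ r _ hr]
    have e2 : (if ((t ++ num :: d).getD r 0 == num) then 1 else 0) = 1 := by simp [hself']
    rw [e2]
    congr 1
    unfold cntCol
    apply List.countP_congr
    intro k _
    by_cases h : k = r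
    · simp [h]
    · simp [h, hother' k h]
  have h2 : (((PySem.List.pyRange 0 (((t ++ num :: d).length : Nat) : Int) 1).map
        (fun x => x - PySem.List.pyGetD (t ++ num :: d) x 0)).count ((r : Int) - num))
      = cntDiag s r num + 1 := by
    rw [hblen, PySem.List.pyRange_zero_nat, List.map_map, List.count_eq_countP,
      List.countP_map, countP_range_split _ r _ hr]
    congr 1
    · unfold cntDiag
      apply List.countP_congr
      intro k _
      by_cases h : k = r
      · simp [h]
      · simp [h, hother' k h]
    · simp [hself']
  have h3 : ((((PySem.List.pyRange 0 (((t ++ num :: d).length : Nat) : Int) 1).filter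
        (fun x => PySem.List.pyGetD (t ++ num :: d) x 0 != -1)).map
        (fun x => x + PySem.List.pyGetD (t ++ num :: d) x 0)).count ((r : Int) + num))
      = cntAnti s r num + 1 := by
    rw [hblen, PySem.List.pyRange_zero_nat, List.count_eq_countP, List.countP_map,
      List.countP_filter, List.countP_map, countP_range_split _ r _ hr]
    congr 1
    · unfold cntAnti
      apply List.countP_congr
      intro k _
      by_cases h : k = r
      · simp [h]
      · simp [h, hother' k h, Bool.and_comm]
    · simp [hself']
      omega
  simp only [collisionsA, hbi, h1]
  rw [h2, h3]
  push_cast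
  ring

lemma counterB_getD (l : List Int) (v : Int) :
    (counterB l).getD v 0 = (l.count v : Int) := by
  unfold counterB
  rw [PySem.Dict.getD_foldl_insert_add_one]
  simp [PySem.Dict.getD_empty]

lemma altCol_eq (s : List Int) (r : Nat) (num : Int) :
    ((((PySem.List.pyRange 0 (s.length : Int) 1).filter (fun x => x != (r : Int))).map
        (fun x => (x, PySem.List.pyGetD s x 0))).map (fun p => p.2)).count num
      = cntCol s r num := by
  rw [List.map_map, List.count_eq_countP, List.countP_map, List.countP_filter,
    PySem.List.pyRange_zero_nat, List.countP_map]
  unfold cntCol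
  apply List.countP_congr
  intro k _
  by_cases h : k = r
  · simp [h]
  · simp [h, Bool.and_comm]

lemma altDiag_eq (s : List Int) (r : Nat) (num : Int) :
    ((((PySem.List.pyRange 0 (s.length : Int) 1).filter (fun x => x != (r : Int))).map
        (fun x => (x, PySem.List.pyGetD s x 0))).map (fun p => p.1 - p.2)).count ((r : Int) - num)
      = cntDiag s r num := by
  rw [List.map_map, List.count_eq_countP, List.countP_map, List.countP_filter,
    PySem.List.pyRange_zero_nat, List.countP_map]
  unfold cntDiag
  apply List.countP_congr
  intro k _
  by_cases h : k = r
  · simp [h]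
  · simp [h, Bool.and_comm]

lemma altAnti_eq (s : List Int) (r : Nat) (num : Int) :
    (((((PySem.List.pyRange 0 (s.length : Int) 1).filter (fun x => x != (r : Int))).map
        (fun x => (x, PySem.List.pyGetD s x 0))).filter (fun p => p.2 != -1)).map
        (fun p => p.1 + p.2)).count ((r : Int) + num)
      = cntAnti s r num := by
  rw [List.count_eq_countP, List.countP_map, List.countP_filter, List.countP_map,
    List.countP_filter, PySem.List.pyRange_zero_nat, List.countP_map]
  unfold cntAnti
  apply List.countP_congr
  intro k _
  by_cases h : k = r
  · simp [h]
  · simp [h, Bool.and_comm]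

-- the two hand-ported copies of heapq.heapify are the same function
lemma siftdown_eq (startpos pos : Nat) (newitem : Int × Int) :
    ∀ (fuel : Nat) (heap : Array (Int × Int)),
      pySiftdownA heap startpos pos newitem fuel = pySiftdownB heap startpos pos newitem fuel := by
  intro fuel
  induction fuel generalizing startpos pos newitem with
  | zero => intro heap; rfl
  | succ n ih =>
    intro heap
    simp only [pySiftdownA, pySiftdownB, pyLexLtA, pyLexLtB]
    split_ifs <;> simp [ih]

lemma siftup_eq (startpos pos : Nat) (newitem : Int × Int) :
    ∀ (fuel : Nat) (heap : Array (Int × Int)),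
      pySiftupA heap startpos pos newitem fuel = pySiftupB heap startpos pos newitem fuel := by
  intro fuel
  induction fuel generalizing startpos pos newitem with
  | zero => intro heap; rfl
  | succ n ih =>
    intro heap
    simp only [pySiftupA, pySiftupB, pyLexLtA, pyLexLtB]
    split_ifs <;> simp [ih, siftdown_eq]

lemma heapify_eq (l : List (Int × Int)) : pyHeapifyA l = pyHeapifyB l := by
  unfold pyHeapifyA pyHeapifyB
  dsimp only
  congr 1
  apply PySem.List.foldl_congr_mem
  intro acc x _
  exact siftup_eq x x (acc.getD x (0, 0)) (acc.size + 1) acc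

theorem get_sorted_values_spec : Claim_equal_get_sorted_values := by
  intro state row _ hpre
  have hpre' : 0 ≤ row ∧ row < (state.length : Int) := hpre
  obtain ⟨h0, h1⟩ := hpre'
  set r := row.toNat with hrdef
  have hrow : row = (r : Int) := by omega
  have hr : r < state.length := by omega
  unfold Spec_get_sorted_values get_sorted_values get_sorted_values_alt
  simp only []
  rw [hrow]
  rw [PySem.List.foldl_append_if
      (p := fun num => num != PySem.List.pyGetD state (r : Int) 0)
      (f := fun num => (collisionsA (PySem.List.slice state none (some (r : Int)) ++ [num] ++
        PySem.List.slice state (some ((r : Int) + 1)) none) (r : Int), num))]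
  rw [List.nil_append, heapify_eq]
  refine congrArg pyHeapifyB (List.map_congr_left ?_)
  intro num hnum
  have hmem := (List.mem_filter.mp hnum).1
  obtain ⟨hn0, hn1⟩ := PySem.List.mem_pyRange_one.mp hmem
  have e1 : ((r : Int) + 1).toNat = r + 1 := by omega
  have e2 : ((r : Int)).toNat = r := by omega
  rw [PySem.List.slice_to state (by omega), PySem.List.slice_from state (by omega), e1, e2]
  have eb : (state.take r ++ [num]) ++ state.drop (r + 1)
      = state.take r ++ num :: state.drop (r + 1) := by
    simp
  rw [eb, collisionsA_eq state r num hr hn0,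
    counterB_getD, counterB_getD, counterB_getD, altCol_eq, altDiag_eq, altAnti_eq]
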